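-- pv_equiv track=rewrite | github.com/Gilbertus-master/personal-ai | app/db/conversation_store.py | _apply_window
-- ===== SOURCE A (Python) =====
-- MAX_MESSAGES = 20       # max liczba wiadomości w oknie
--
-- MAX_CHARS = 8_000       # max łączna długość znaków (bezpieczny limit tokenów)
--
-- def _apply_window(messages: list[dict]) -> list[dict]:
--     """
--     Apply sliding window constraints:
--     1. Max MAX_MESSAGES messages
--     2. Max MAX_CHARS total characters
--     Always keeps most recent messages.
--     """
--     if len(messages) > MAX_MESSAGES:
--         messages = messages[-MAX_MESSAGES:]
--
--     while messages:
--         total = sum(len(m["text"]) for m in messages)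
--         if total <= MAX_CHARS:
--             break
--         messages = messages[1:]
--
--     return messages
-- ===== SOURCE B (Python) =====
-- MAX_MESSAGES = 20
-- MAX_CHARS = 8_000
--
-- def _apply_window(messages):
--     if len(messages) > MAX_MESSAGES:
--         messages = messages[-MAX_MESSAGES:]
--     lens = [len(m["text"]) for m in messages]
--     kept = 0
--     total = 0
--     for n in reversed(lens):
--         if total + n <= MAX_CHARS:
--             kept += 1
--             total += n
--         else:
--             break
--     return messages[len(messages) - kept:]
-- ===== Notes on version B (the rewrite author's own statement) =====
-- stated objective: faster
-- what changed: Replaces A's while loop that re-sums the whole remaining list and re-slices it each iteration with one length comprehension plus a single backward accumulation pass that counts how many recent messages fit, returning that suffix.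
import Mathlib
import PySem

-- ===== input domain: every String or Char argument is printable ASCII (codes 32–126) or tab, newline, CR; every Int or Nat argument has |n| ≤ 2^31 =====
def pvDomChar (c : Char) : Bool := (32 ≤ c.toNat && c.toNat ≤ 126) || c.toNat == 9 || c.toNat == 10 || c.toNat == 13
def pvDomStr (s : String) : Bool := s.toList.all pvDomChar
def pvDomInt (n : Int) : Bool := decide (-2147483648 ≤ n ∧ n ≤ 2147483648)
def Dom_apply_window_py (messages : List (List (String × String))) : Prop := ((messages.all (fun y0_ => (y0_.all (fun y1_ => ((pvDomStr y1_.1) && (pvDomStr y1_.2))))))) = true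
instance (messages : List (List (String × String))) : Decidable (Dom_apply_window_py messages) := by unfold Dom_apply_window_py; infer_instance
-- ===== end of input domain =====

-- B replaces A's quadratic re-sum-and-reslice while loop with one backward accumulation
-- pass over precomputed text lengths (faster by a constant/asymptotic-in-window factor).

-- ===== PORT A =====
-- m["text"] as association-list lookup (first match); with Pre_, the key is present,
-- so getD "" is exact (outside Pre_ Python raises KeyError and nothing is claimed).
def pvTextLen (m : List (String × String)) : Nat :=
  (((m.find? (fun p => p.1 == "text")).map Prod.snd).getD "").toList.length

-- total = sum(len(m["text"]) for m in messages)
def pvSumLen (xs : List (List (String × String))) : Nat := (xs.map pvTextLen).sum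

-- while messages: total = …; if total <= MAX_CHARS: break; messages = messages[1:]
def pvLoopA : List (List (String × String)) → List (List (String × String))
  | [] => []
  | m :: rest => if pvSumLen (m :: rest) ≤ 8000 then m :: rest else pvLoopA rest

def apply_window_py (messages : List (List (String × String))) : List (List (String × String)) :=
  let messages := if messages.length > 20 then PySem.List.slice messages (some (-20)) none else messages
  pvLoopA messages

-- ===== PORT B =====
-- for n in reversed(lens): if total + n <= MAX_CHARS: kept += 1; total += n else: break
def pvGoB : List Nat → Nat → Nat → Nat
  | [], kept, _ => kept
  | n :: ls, kept, total =>
      if total + n ≤ 8000 then pvGoB ls (kept + 1) (total + n) else kept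

def apply_window_py_alt (messages : List (List (String × String))) : List (List (String × String)) :=
  let messages := if messages.length > 20 then PySem.List.slice messages (some (-20)) none else messages
  let lens := messages.map pvTextLen
  let kept := pvGoB lens.reverse 0 0
  messages.drop (messages.length - kept)

-- ===== PRECONDITION & SPEC =====
-- Pre_ excludes inputs where some message inside the kept 20-message window lacks a
-- "text" key: there Python A raises KeyError (so A returns on exactly the Pre_ inputs).
def Pre_apply_window_py (messages : List (List (String × String))) : Prop :=
  ∀ m ∈ messages.drop (messages.length - 20), "text" ∈ m.map Prod.fst
instance (messages : List (List (String × String))) : Decidable (Pre_apply_window_py messages) := by unfold Pre_apply_window_py; infer_instance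

def pvWitness_apply_window_py : (List (List (String × String))) := [[("text", "hi")], [("text", "there")]]

def Spec_apply_window_py (messages : List (List (String × String))) (out : List (List (String × String))) : Prop := out = apply_window_py_alt messages
instance (messages : List (List (String × String))) (out : List (List (String × String))) : Decidable (Spec_apply_window_py messages out) := by unfold Spec_apply_window_py; infer_instance

-- ===== CLAIM (what is proved, stated in full; the proofs are below) =====
def Claim_equal_apply_window_py : Prop := ∀ (messages : List (List (String × String))), Dom_apply_window_py messages → Pre_apply_window_py messages → Spec_apply_window_py messages (apply_window_py messages)

-- ===== LEMMAS AND PROOFS =====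

-- the pure counting core of B's backward pass
def pvG : List Nat → Nat → Nat
  | [], _ => 0
  | n :: ls, t => if t + n ≤ 8000 then 1 + pvG ls (t + n) else 0

theorem pvG_zero_of_gt (ls : List Nat) (t : Nat) (h : 8000 < t) : pvG ls t = 0 := by
  cases ls with
  | nil => rfl
  | cons n ls => simp only [pvG]; rw [if_neg (by omega)]

theorem pvGoB_eq_pvG (ls : List Nat) (k t : Nat) : pvGoB ls k t = k + pvG ls t := by
  induction ls generalizing k t with
  | nil => simp [pvGoB, pvG]
  | cons n ls ih =>
      simp only [pvGoB, pvG]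
      split_ifs with h
      · rw [ih]; omega
      · omega

theorem pvG_le (ls : List Nat) (t : Nat) : pvG ls t ≤ ls.length := by
  induction ls generalizing t with
  | nil => simp [pvG]
  | cons n ls ih =>
      simp only [pvG]
      split_ifs with h
      · have := ih (t + n); simp; omega
      · simp

theorem pvG_full (ls : List Nat) (t : Nat) (h : t + ls.sum ≤ 8000) : pvG ls t = ls.length := by
  induction ls generalizing t with
  | nil => simp [pvG]
  | cons n ls ih =>
      simp only [List.sum_cons] at h
      have h1 : t + n ≤ 8000 := by omega
      simp only [pvG, if_pos h1, List.length_cons]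
      rw [ih (t + n) (by omega)]
      omega

theorem pvG_append (p q : List Nat) (t : Nat) :
    pvG (p ++ q) t = if t + p.sum ≤ 8000 then p.length + pvG q (t + p.sum) else pvG p t := by
  induction p generalizing t with
  | nil =>
      simp only [List.nil_append, List.sum_nil, Nat.add_zero, List.length_nil, Nat.zero_add]
      split_ifs with h
      · rfl
      · exact (pvG_zero_of_gt q t (by omega)).trans (by simp [pvG])
  | cons n p ih =>
      simp only [List.cons_append, pvG, List.sum_cons, List.length_cons]
      split_ifs with h1 h2 h2
      · rw [ih]; rw [if_pos (by omega)]
        have : t + n + p.sum = t + (n + p.sum) := by omega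
        rw [this]; omega
      · rw [ih]; rw [if_neg (by omega)]
      · omega
      · rfl

-- A's drop-from-front loop equals keeping the suffix B's backward pass counts
theorem pvLoopA_eq_drop (xs : List (List (String × String))) :
    pvLoopA xs = xs.drop (xs.length - pvGoB ((xs.map pvTextLen).reverse) 0 0) := by
  induction xs with
  | nil => simp [pvLoopA]
  | cons m rest ih =>
      rw [pvGoB_eq_pvG]
      simp only [pvLoopA, List.map_cons, List.reverse_cons]
      by_cases h : pvSumLen (m :: rest) ≤ 8000
      · rw [if_pos h]
        have hsum : ((rest.map pvTextLen).reverse ++ [pvTextLen m]).sum = pvSumLen (m :: rest) := by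
          simp [pvSumLen, List.sum_append, List.sum_reverse]; omega
        rw [Nat.zero_add, pvG_full _ 0 (by rw [hsum]; omega)]
        simp
      · rw [if_neg h]
        have hsum : (rest.map pvTextLen).reverse.sum + pvTextLen m = pvSumLen (m :: rest) := by
          simp [pvSumLen, List.sum_reverse]; omega
        rw [pvG_append]
        by_cases hp : 0 + (rest.map pvTextLen).reverse.sum ≤ 8000
        · rw [if_pos hp]
          have : pvG [pvTextLen m] (0 + (rest.map pvTextLen).reverse.sum) = 0 := by
            simp only [pvG]
            rw [if_neg (by omega)]
          rw [this, Nat.add_zero]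
          have hlen : (rest.map pvTextLen).reverse.length = rest.length := by simp
          rw [hlen]
          have hfull : pvG (rest.map pvTextLen).reverse 0 = rest.length := by
            have := pvG_full (rest.map pvTextLen).reverse 0 (by omega)
            simpa using this
          rw [ih, pvGoB_eq_pvG, Nat.zero_add, hfull]
          simp
        · rw [if_neg hp]
          have hle : pvG (rest.map pvTextLen).reverse 0 ≤ rest.length := by
            have := pvG_le (rest.map pvTextLen).reverse 0; simpa using this
          rw [ih, pvGoB_eq_pvG, Nat.zero_add]
          have hlen : (m :: rest).length - pvG (rest.map pvTextLen).reverse 0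
              = (rest.length - pvG (rest.map pvTextLen).reverse 0) + 1 := by
            simp only [List.length_cons]; omega
          rw [hlen, List.drop_succ_cons]

-- ===== VERDICT (by name: the statement is the Claim_ definition above) =====
theorem apply_window_py_spec : Claim_equal_apply_window_py := by
  intro messages _ _
  unfold Spec_apply_window_py apply_window_py apply_window_py_alt
  exact pvLoopA_eq_drop _
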